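-- pv_equiv track=rewrite | github.com/YacineBelal/Community-Detection-Attack-against-Collaborative-Learning-based-Recommender-Systems-and-Countermeasu | FL Setting/node.py | get_user_test_set
-- ===== SOURCE A (Python) =====
-- def get_user_test_set(testRatings,testNegatives,user):
--     personal_testRatings = []
--     personal_testNegatives = []
--
--     for i in range(len(testRatings)):
--         idx = testRatings[i][0]
--         if idx == user:
--             personal_testRatings.append(testRatings[i])
--             personal_testNegatives.append(testNegatives[i])
--         elif idx > user:
--             break
--
--     return personal_testRatings,personal_testNegatives
-- ===== SOURCE B (Python) =====
-- def get_user_test_set(testRatings, testNegatives, user):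
--     # find the end of the scanned prefix: first index whose first entry exceeds user
--     end = next((i for i, r in enumerate(testRatings) if r[0] > user), len(testRatings))
--     keep = [i for i in range(end) if testRatings[i][0] == user]
--     return [testRatings[i] for i in keep], [testNegatives[i] for i in keep]
-- ===== Notes on version B (the rewrite author's own statement) =====
-- stated objective: idiomatic
-- what changed: Replaces the single accumulating loop with break by a find-first-break-index step followed by comprehension-built filtered index list and two projections; same O(n) cost and identical results including on unsorted input.
import Mathlib
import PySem

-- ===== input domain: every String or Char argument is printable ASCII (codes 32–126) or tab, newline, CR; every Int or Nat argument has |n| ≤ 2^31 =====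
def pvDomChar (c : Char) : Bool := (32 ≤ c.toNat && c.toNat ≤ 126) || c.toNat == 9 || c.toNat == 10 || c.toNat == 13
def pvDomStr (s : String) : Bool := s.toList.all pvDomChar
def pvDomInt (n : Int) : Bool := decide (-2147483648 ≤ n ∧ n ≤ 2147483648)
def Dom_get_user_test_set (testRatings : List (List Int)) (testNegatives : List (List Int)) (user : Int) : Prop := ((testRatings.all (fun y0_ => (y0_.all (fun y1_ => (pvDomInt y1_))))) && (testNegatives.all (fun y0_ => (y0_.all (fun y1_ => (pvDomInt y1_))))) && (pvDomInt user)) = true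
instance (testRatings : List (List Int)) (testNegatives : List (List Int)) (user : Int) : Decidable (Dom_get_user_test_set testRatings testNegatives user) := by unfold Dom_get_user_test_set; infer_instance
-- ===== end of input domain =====

-- B replaces A's accumulating break-loop by a find-break-index + filtered index list + two
-- projections (idiomatic decomposition, same O(n) cost, identical values on every input in Pre_).

-- ===== PORT A =====
-- the for-i-in-range loop with break, as structural recursion on the index i with the two accumulators
def pvALoop (testRatings testNegatives : List (List Int)) (user : Int) (i : Nat)
    (pR pN : List (List Int)) : List (List Int) × List (List Int) :=
  if h : i < testRatings.length then
    let row := (PySem.List.pyGet? testRatings (i : Int)).getD []   -- testRatings[i]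
    let idx := (PySem.List.pyGet? row 0).getD 0                    -- testRatings[i][0]
    if idx = user then
      pvALoop testRatings testNegatives user (i + 1)
        (pR ++ [row]) (pN ++ [(PySem.List.pyGet? testNegatives (i : Int)).getD []])
    else if user < idx then (pR, pN)                               -- break
    else pvALoop testRatings testNegatives user (i + 1) pR pN
  else (pR, pN)
termination_by testRatings.length - i

def get_user_test_set (testRatings : List (List Int)) (testNegatives : List (List Int)) (user : Int) : List (List Int) × List (List Int) :=
  pvALoop testRatings testNegatives user 0 [] []

-- ===== PORT B =====
-- next((i for i, r in enumerate(testRatings) if r[0] > user), len(testRatings))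
def pvBEnd (user : Int) : List (List Int) → Nat
  | [] => 0
  | r :: rest => if user < (PySem.List.pyGet? r 0).getD 0 then 0 else pvBEnd user rest + 1

def get_user_test_set_alt (testRatings : List (List Int)) (testNegatives : List (List Int)) (user : Int) : List (List Int) × List (List Int) :=
  let e := pvBEnd user testRatings
  let keep := (List.range e).filter
    (fun (i : Nat) => (PySem.List.pyGet? ((PySem.List.pyGet? testRatings (i : Int)).getD []) 0).getD 0 == user)
  (keep.map (fun (i : Nat) => (PySem.List.pyGet? testRatings (i : Int)).getD []),
   keep.map (fun (i : Nat) => (PySem.List.pyGet? testNegatives (i : Int)).getD []))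

-- ===== PRECONDITION & SPEC =====
-- Pre_ excludes exactly the inputs on which A raises IndexError: a row that is empty, or a
-- matching index past the end of testNegatives, reached before the break.  (The two ports agree
-- even outside Pre_; Pre_ only delimits where the Python programs return.)
def Pre_get_user_test_set (testRatings : List (List Int)) (testNegatives : List (List Int)) (user : Int) : Prop :=
  ∀ i < testRatings.length,
    (∀ j < i, testRatings.getD j [] ≠ [] ∧ (testRatings.getD j []).headD 0 ≤ user ∧
       ((testRatings.getD j []).headD 0 = user → j < testNegatives.length)) →
    (testRatings.getD i [] ≠ [] ∧ ((testRatings.getD i []).headD 0 = user → i < testNegatives.length))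
instance (testRatings : List (List Int)) (testNegatives : List (List Int)) (user : Int) : Decidable (Pre_get_user_test_set testRatings testNegatives user) := by unfold Pre_get_user_test_set; infer_instance

def pvWitness_get_user_test_set : List (List Int) × List (List Int) × Int :=
  ([[1, 5], [2, 7], [2, 8], [3, 9]], [[10, 11], [12], [13], [14]], 2)

def Spec_get_user_test_set (testRatings : List (List Int)) (testNegatives : List (List Int)) (user : Int) (out : List (List Int) × List (List Int)) : Prop := out = get_user_test_set_alt testRatings testNegatives user
instance (testRatings : List (List Int)) (testNegatives : List (List Int)) (user : Int) (out : List (List Int) × List (List Int)) : Decidable (Spec_get_user_test_set testRatings testNegatives user out) := by unfold Spec_get_user_test_set; infer_instance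

-- ===== CLAIM (what is proved, stated in full; the proofs are below) =====
def Claim_equal_get_user_test_set : Prop := ∀ (testRatings : List (List Int)) (testNegatives : List (List Int)) (user : Int), Dom_get_user_test_set testRatings testNegatives user → Pre_get_user_test_set testRatings testNegatives user → Spec_get_user_test_set testRatings testNegatives user (get_user_test_set testRatings testNegatives user)

-- ===== LEMMAS AND PROOFS =====

-- the main invariant: from any index i, A's loop appends exactly B's filtered/mapped block
-- for the suffix, where the break index seen from i is pvBEnd of the dropped list.
theorem pvALoop_eq (tR tN : List (List Int)) (user : Int) :
    ∀ (s : List (List Int)) (i : Nat) (pR pN : List (List Int)), s = tR.drop i →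
    pvALoop tR tN user i pR pN =
      (pR ++ ((List.range' i (pvBEnd user s)).filter
          (fun (j : Nat) => (PySem.List.pyGet? ((PySem.List.pyGet? tR (j : Int)).getD []) 0).getD 0 == user)).map
          (fun (j : Nat) => (PySem.List.pyGet? tR (j : Int)).getD []),
       pN ++ ((List.range' i (pvBEnd user s)).filter
          (fun (j : Nat) => (PySem.List.pyGet? ((PySem.List.pyGet? tR (j : Int)).getD []) 0).getD 0 == user)).map
          (fun (j : Nat) => (PySem.List.pyGet? tN (j : Int)).getD [])) := by
  intro s
  induction s with
  | nil =>
    intro i pR pN hs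
    have hlen : tR.length ≤ i := by
      have := List.drop_eq_nil_iff.mp hs.symm
      omega
    unfold pvALoop
    simp [pvBEnd, Nat.not_lt.mpr hlen]
  | cons r rest ih =>
    intro i pR pN hs
    have hget : tR[i]? = some r := by
      have h0 : (tR.drop i)[0]? = some r := by rw [← hs]; rfl
      simpa using h0
    have hi : i < tR.length := List.getElem?_eq_some_iff.mp hget |>.1
    have hdrop : rest = tR.drop (i + 1) := by
      have h1 : (tR.drop i).drop 1 = tR.drop (i + 1) := List.drop_drop ..
      rw [← hs] at h1
      simpa using h1
    have hrow : (PySem.List.pyGet? tR (i : Int)).getD [] = r := by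
      simp [PySem.List.pyGet?_natCast, hget]
    unfold pvALoop
    rw [dif_pos hi]
    simp only [hrow]
    by_cases heq : (PySem.List.pyGet? r 0).getD 0 = user
    · -- matched row: appended on both sides
      rw [if_pos heq]
      rw [ih (i + 1) _ _ hdrop]
      have hbe : pvBEnd user (r :: rest) = pvBEnd user rest + 1 := by
        simp [pvBEnd, heq]
      rw [hbe, List.range'_succ, List.filter_cons]
      have : ((PySem.List.pyGet? ((PySem.List.pyGet? tR (i : Int)).getD []) 0).getD 0 == user) = true := by
        simp [hget, heq]
      rw [if_pos this]
      simp [hget]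
    · by_cases hlt : user < (PySem.List.pyGet? r 0).getD 0
      · -- break
        rw [if_neg heq, if_pos hlt]
        have hbe : pvBEnd user (r :: rest) = 0 := by simp [pvBEnd, hlt]
        simp [hbe]
      · -- idx < user: skip
        rw [if_neg heq, if_neg hlt]
        rw [ih (i + 1) _ _ hdrop]
        have hbe : pvBEnd user (r :: rest) = pvBEnd user rest + 1 := by
          simp [pvBEnd, hlt]
        rw [hbe, List.range'_succ, List.filter_cons]
        have : ((PySem.List.pyGet? ((PySem.List.pyGet? tR (i : Int)).getD []) 0).getD 0 == user) = false := by
          simp [hget, heq]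
        rw [this]
        simp

-- ===== VERDICT (by name: the statement is the Claim_ definition above) =====
theorem get_user_test_set_spec : Claim_equal_get_user_test_set := by
  intro tR tN user _ _
  unfold Spec_get_user_test_set get_user_test_set get_user_test_set_alt
  rw [pvALoop_eq tR tN user tR 0 [] [] (by simp)]
  simp [List.range_eq_range']
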